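-- pv_equiv track=rewrite | github.com/lrieram/AdventOfCode | 2015/18/18.py | nextStepFixedCorners
-- ===== SOURCE A (Python) =====
-- def neighbors(i, j, n, m):
--     res = []
--     positions = [(i-1, j-1), (i, j-1), (i+1, j-1),
--                  (i-1, j), (i+1, j),
--                  (i-1, j+1), (i, j+1), (i+1, j+1)]
--     for (k, l) in positions:
--         if 0 <= k < n and 0 <= l < m:
--             res.append((k, l))
--     return res
--
-- def neighborsLights(lights, i, j):
--     neighborhood = neighbors(i, j, len(lights), len(lights[i]))
--     n = 0
--     for pos in neighborhood:
--         if lights[pos[0]][pos[1]] == '#':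
--             n += 1
--     return n
--
-- def nextStepSingle(lights, i, j):
--     neighbors = neighborsLights(lights, i, j)
--     if lights[i][j] == '#':
--         if neighbors == 2 or neighbors == 3:
--             return '#'
--         else:
--             return '.'
--     else:
--         if neighbors == 3:
--             return '#'
--         else:
--             return '.'
--
-- def nextStepFixedCorners(lights):
--     next_lights = []
--     for i in range(len(lights)):
--         new_row = ''
--         for j in range(len(lights[0])):
--             new_row += nextStepSingle(lights, i, j)
--         if i == 0 or i == (len(lights) - 1):
--             new_row = '#' + new_row [1:-1] + '#'
--         next_lights.append(new_row)
--     return next_lights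
-- ===== SOURCE B (Python) =====
-- # Scatter/counter re-implementation: instead of gathering the 8 neighbours of every
-- # cell (rebuilding a filtered position list per cell), make one pass over the grid
-- # bumping a dict counter at the 8 neighbour keys of every '#' cell (no bounds checks
-- # needed: out-of-grid keys are simply never read), then a second pass applies the
-- # life rule from the counter and the identical corner fix.
-- OFFSETS = [(-1, -1), (0, -1), (1, -1), (-1, 0), (1, 0), (-1, 1), (0, 1), (1, 1)]
--
-- def nextStepFixedCorners(lights):
--     if not lights:
--         return []
--     n, m = len(lights), len(lights[0])
--     counts = {}
--     for i, row in enumerate(lights):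
--         for j in range(m):
--             if row[j] == '#':
--                 for (di, dj) in OFFSETS:
--                     key = (i + di, j + dj)
--                     counts[key] = counts.get(key, 0) + 1
--     out = []
--     for i in range(n):
--         new_row = ''
--         for j in range(m):
--             c = counts.get((i, j), 0)
--             new_row += '#' if c == 3 or (lights[i][j] == '#' and c == 2) else '.'
--         if i == 0 or i == n - 1:
--             new_row = '#' + new_row[1:-1] + '#'
--         out.append(new_row)
--     return out
-- ===== Notes on version B (the rewrite author's own statement) =====
-- stated objective: faster
-- what changed: Replaces the per-cell gather (allocating a filtered 8-neighbour position list for every cell) by a single scatter pass that bumps a dict counter at the 8 neighbour keys of each '#' cell with no bounds checks, followed by a pass applying the rule from the counter.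
import Mathlib
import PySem

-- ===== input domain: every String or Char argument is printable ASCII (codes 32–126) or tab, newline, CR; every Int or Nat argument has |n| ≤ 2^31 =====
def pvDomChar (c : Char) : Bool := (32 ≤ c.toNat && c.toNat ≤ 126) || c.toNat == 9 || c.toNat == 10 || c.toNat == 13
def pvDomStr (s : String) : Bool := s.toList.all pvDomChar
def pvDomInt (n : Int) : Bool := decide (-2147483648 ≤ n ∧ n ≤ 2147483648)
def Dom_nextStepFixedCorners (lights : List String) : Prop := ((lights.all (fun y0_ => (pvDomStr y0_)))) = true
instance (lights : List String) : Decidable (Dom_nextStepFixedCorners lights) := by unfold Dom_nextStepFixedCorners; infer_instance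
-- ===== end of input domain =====

-- B replaces A's per-cell 8-neighbour gather by one scatter pass bumping a dict counter at the
-- neighbour keys of every '#' cell (same asymptotics, measurably faster by a constant factor).

-- ===== PORT A =====
def pvCharAt (lights : List String) (k l : Int) : Char :=
  PySem.List.pyGetD (PySem.List.pyGetD lights k "").toList l ' '

def pvNeighborsA (i j n m : Int) : List (Int × Int) :=
  [(i-1,j-1),(i,j-1),(i+1,j-1),(i-1,j),(i+1,j),(i-1,j+1),(i,j+1),(i+1,j+1)].foldl
    (fun res p => if decide (0 ≤ p.1 ∧ p.1 < n ∧ 0 ≤ p.2 ∧ p.2 < m) = true then res ++ [p] else res) []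

def pvNeighborsLightsA (lights : List String) (i j : Int) : Int :=
  (pvNeighborsA i j (lights.length : Int) ((PySem.List.pyGetD lights i "").toList.length : Int)).foldl
    (fun nn p => if decide (pvCharAt lights p.1 p.2 = '#') = true then nn + 1 else nn) 0

def pvNextStepSingleA (lights : List String) (i j : Int) : Char :=
  if pvCharAt lights i j = '#' then
    (if pvNeighborsLightsA lights i j = 2 ∨ pvNeighborsLightsA lights i j = 3 then '#' else '.')
  else
    (if pvNeighborsLightsA lights i j = 3 then '#' else '.')

def pvOutRowA (lights : List String) (i : Int) : String :=
  let new_row : List Char :=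
    (PySem.List.pyRange 0 ((PySem.List.pyGetD lights 0 "").toList.length : Int)).foldl
      (fun r j => r ++ [pvNextStepSingleA lights i j]) []
  let new_row := if i = 0 ∨ i = (lights.length : Int) - 1
    then '#' :: PySem.List.slice new_row (some 1) (some (-1)) ++ ['#'] else new_row
  String.ofList new_row

def nextStepFixedCorners (lights : List String) : List String :=
  (PySem.List.pyRange 0 (lights.length : Int)).foldl
    (fun next_lights i => next_lights ++ [pvOutRowA lights i]) []

-- ===== PORT B =====
def pvOffsetsB : List (Int × Int) := [(-1,-1),(0,-1),(1,-1),(-1,0),(1,0),(-1,1),(0,1),(1,1)]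

def pvScatterB (lights : List String) (m : Int) : PySem.Dict (Int × Int) Int :=
  (PySem.List.enumerate lights).foldl (fun counts ir =>
    (PySem.List.pyRange 0 m).foldl (fun counts j =>
      if PySem.List.pyGetD ir.2.toList j ' ' = '#' then
        pvOffsetsB.foldl (fun counts o =>
          counts.insert (ir.1 + o.1, j + o.2) (counts.getD (ir.1 + o.1, j + o.2) 0 + 1)) counts
      else counts) counts) PySem.Dict.empty

def pvOutRowB (lights : List String) (counts : PySem.Dict (Int × Int) Int) (m : Int) (i : Int) : String :=
  let new_row : List Char := (PySem.List.pyRange 0 m).foldl (fun r j =>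
    let c := counts.getD (i, j) 0
    r ++ [if c = 3 ∨ (pvCharAt lights i j = '#' ∧ c = 2) then '#' else '.']) []
  let new_row := if i = 0 ∨ i = (lights.length : Int) - 1
    then '#' :: PySem.List.slice new_row (some 1) (some (-1)) ++ ['#'] else new_row
  String.ofList new_row

def nextStepFixedCorners_alt (lights : List String) : List String :=
  if lights = [] then []
  else
    let m : Int := ((PySem.List.pyGetD lights 0 "").toList.length : Int)
    let counts := pvScatterB lights m
    (PySem.List.pyRange 0 (lights.length : Int)).foldl
      (fun out i => out ++ [pvOutRowB lights counts m i]) []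

-- ===== PRECONDITION & SPEC =====
-- Pre_ excludes exactly the ragged non-trivial grids, on which the Python A raises IndexError
-- (a row longer/shorter than row 0, with row 0 nonempty, makes A read past a row's end).
def Pre_nextStepFixedCorners (lights : List String) : Prop :=
  (PySem.List.pyGetD lights 0 "").toList.length = 0 ∨
    ∀ s ∈ lights, s.toList.length = (PySem.List.pyGetD lights 0 "").toList.length
instance (lights : List String) : Decidable (Pre_nextStepFixedCorners lights) := by
  unfold Pre_nextStepFixedCorners; infer_instance

def pvWitness_nextStepFixedCorners : List String := ["##.", ".#.", "..#"]

def Spec_nextStepFixedCorners (lights : List String) (out : List String) : Prop := out = nextStepFixedCorners_alt lights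
instance (lights : List String) (out : List String) : Decidable (Spec_nextStepFixedCorners lights out) := by unfold Spec_nextStepFixedCorners; infer_instance

-- ===== CLAIM (what is proved, stated in full; the proofs are below) =====
def Claim_equal_nextStepFixedCorners : Prop := ∀ (lights : List String), Dom_nextStepFixedCorners lights → Pre_nextStepFixedCorners lights → Spec_nextStepFixedCorners lights (nextStepFixedCorners lights)

-- ===== LEMMAS AND PROOFS =====

-- the stream of neighbour keys bumped by B's scatter pass, as one flat list
def pvBumps (lights : List String) (m : Int) : List (Int × Int) :=
  (PySem.List.enumerate lights).flatMap (fun ir =>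
    (PySem.List.pyRange 0 m).flatMap (fun j =>
      if PySem.List.pyGetD ir.2.toList j ' ' = '#' then
        pvOffsetsB.map (fun o => (ir.1 + o.1, j + o.2))
      else []))

lemma pvScatter_eq_counter (lights : List String) (m : Int) :
    pvScatterB lights m = PySem.Dict.counter (pvBumps lights m) := by
  unfold pvScatterB pvBumps
  rw [← PySem.Dict.foldl_insert_getD_add_one_eq_counter, List.foldl_flatMap]
  congr 1
  funext counts ir
  rw [List.foldl_flatMap]
  congr 1
  funext d j
  by_cases hc : PySem.List.pyGetD ir.2.toList j ' ' = '#'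
  · simp only [hc, if_pos, List.foldl_map]
  · simp [hc]

-- sum over a list of sums, order of summation swapped
lemma pvSumSwap {α β : Type} (xs : List α) (ys : List β) (f : α → β → ℤ) :
    (xs.map (fun x => (ys.map (f x)).sum)).sum = (ys.map (fun y => (xs.map (fun x => f x y)).sum)).sum := by
  induction ys with
  | nil => simp
  | cons y ys ih =>
    calc (xs.map (fun x => ((y :: ys).map (f x)).sum)).sum
        = (xs.map (fun x => f x y + (ys.map (f x)).sum)).sum := by simp
      _ = (xs.map (fun x => f x y)).sum + (xs.map (fun x => (ys.map (f x)).sum)).sum :=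
          PySem.List.sum_map_add_int xs _ _
      _ = (xs.map (fun x => f x y)).sum + (ys.map (fun y => (xs.map (fun x => f x y)).sum)).sum := by rw [ih]
      _ = ((y :: ys).map (fun y => (xs.map (fun x => f x y)).sum)).sum := by simp

lemma pvSumDelta (l : List Int) (hnd : l.Nodup) (K : Int) (h : Int → ℤ) :
    (l.map (fun x => if x = K then h x else 0)).sum = if K ∈ l then h K else 0 := by
  induction l with
  | nil => simp
  | cons x xs ih =>
    simp only [List.map_cons, List.sum_cons, List.mem_cons]
    rcases List.nodup_cons.1 hnd with ⟨hx, hxs⟩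
    by_cases hK : x = K
    · subst hK
      have hz : (xs.map (fun t => if t = x then h t else 0)).sum = 0 := by
        apply List.sum_eq_zero
        intro z hz
        obtain ⟨t, ht, rfl⟩ := List.mem_map.1 hz
        simp [show t ≠ x from fun he => hx (he ▸ ht)]
      simp [hz, hx]
    · rw [if_neg hK, zero_add, ih hxs]
      have hKx : ¬ (K = x) := fun h' => hK h'.symm
      simp [hKx]

lemma pvSumCongr {α : Type} (l : List α) {f g : α → ℤ} (h : ∀ x ∈ l, f x = g x) :
    (l.map f).sum = (l.map g).sum := congrArg List.sum (List.map_congr_left h)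

-- indicator of a live cell at (k, l), the quantity both neighbour counts sum over
def pvT (lights : List String) (m k l : Int) : ℤ :=
  if 0 ≤ k ∧ k < (lights.length : Int) ∧ 0 ≤ l ∧ l < m ∧ pvCharAt lights k l = '#' then 1 else 0

lemma pvCellCount (lights : List String) (i j k l : Int) :
    ((List.count ((i, j) : Int × Int) (if PySem.List.pyGetD (PySem.List.pyGetD lights k "").toList l ' ' = '#'
        then pvOffsetsB.map (fun o => (k + o.1, l + o.2)) else [])) : ℤ)
    = (pvOffsetsB.map (fun o => if k = i - o.1 ∧ l = j - o.2 ∧ pvCharAt lights k l = '#' then (1:ℤ) else 0)).sum := by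
  by_cases hc : pvCharAt lights k l = '#'
  · have hc' : PySem.List.pyGetD (PySem.List.pyGetD lights k "").toList l ' ' = '#' := hc
    rw [if_pos hc']
    have hinj : Function.Injective (fun o : Int × Int => ((k + o.1, l + o.2) : Int × Int)) := by
      intro a b hab
      simp only [Prod.ext_iff] at hab ⊢
      omega
    have hcnt : List.count ((i, j) : Int × Int)
        (pvOffsetsB.map (fun o => ((k + o.1, l + o.2) : Int × Int)))
        = List.count ((i - k, j - l) : Int × Int) pvOffsetsB := by
      have hij : ((i, j) : Int × Int) = (k + (i - k), l + (j - l)) := by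
        simp only [Prod.ext_iff]; omega
      rw [hij]
      exact List.count_map_of_injective pvOffsetsB
        (fun o : Int × Int => ((k + o.1, l + o.2) : Int × Int)) hinj ((i - k, j - l) : Int × Int)
    rw [hcnt, List.count_eq_countP, ← PySem.List.sum_map_ite_one_zero]
    apply pvSumCongr
    intro o _
    simp only [beq_iff_eq, Prod.ext_iff, hc, and_true]
    split_ifs with h1 h2 h2 <;> first | rfl | (exfalso; omega)
  · have hc' : ¬ PySem.List.pyGetD (PySem.List.pyGetD lights k "").toList l ' ' = '#' := hc
    rw [if_neg hc']
    simp only [List.count_nil, Nat.cast_zero]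
    symm
    apply List.sum_eq_zero
    intro z hz
    obtain ⟨o, _, rfl⟩ := List.mem_map.1 hz
    simp [hc]

lemma pvRowCount (lights : List String) (m i j k : Int) :
    ((List.count ((i, j) : Int × Int) ((PySem.List.pyRange 0 m).flatMap (fun l =>
        if PySem.List.pyGetD (PySem.List.pyGetD lights k "").toList l ' ' = '#'
        then pvOffsetsB.map (fun o => (k + o.1, l + o.2)) else []))) : ℤ)
    = ((PySem.List.pyRange 0 m).map (fun l =>
        (pvOffsetsB.map (fun o => if k = i - o.1 ∧ l = j - o.2 ∧ pvCharAt lights k l = '#'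
          then (1:ℤ) else 0)).sum)).sum := by
  rw [List.count_flatMap, Nat.cast_list_sum, List.map_map]
  exact pvSumCongr _ (fun l _ => pvCellCount lights i j k l)

lemma pvBumpsCount (lights : List String) (m i j : Int) :
    (((pvBumps lights m).count ((i, j) : Int × Int)) : ℤ)
      = (pvOffsetsB.map (fun o => pvT lights m (i - o.1) (j - o.2))).sum := by
  unfold pvBumps
  rw [PySem.List.enumerate_eq_map_pyRange lights "", List.flatMap_map, List.count_flatMap,
    Nat.cast_list_sum, List.map_map]
  trans ((PySem.List.pyRange 0 (PySem.List.len lights)).map (fun k =>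
      ((PySem.List.pyRange 0 m).map (fun l =>
        (pvOffsetsB.map (fun o => if k = i - o.1 ∧ l = j - o.2 ∧ pvCharAt lights k l = '#'
          then (1:ℤ) else 0)).sum)).sum)).sum
  · exact pvSumCongr _ (fun k _ => pvRowCount lights m i j k)
  rw [pvSumCongr _ (fun k (_ : k ∈ PySem.List.pyRange 0 (PySem.List.len lights)) =>
    pvSumSwap (PySem.List.pyRange 0 m) pvOffsetsB
      (fun l o => if k = i - o.1 ∧ l = j - o.2 ∧ pvCharAt lights k l = '#' then (1:ℤ) else 0))]
  rw [pvSumSwap]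
  apply pvSumCongr
  intro o _
  have inner : ∀ k : Int, ((PySem.List.pyRange 0 m).map (fun l =>
        if k = i - o.1 ∧ l = j - o.2 ∧ pvCharAt lights k l = '#' then (1:ℤ) else 0)).sum
      = if k = i - o.1 then (if 0 ≤ j - o.2 ∧ j - o.2 < m ∧ pvCharAt lights k (j - o.2) = '#'
          then (1:ℤ) else 0) else 0 := by
    intro k
    have h1 : ((PySem.List.pyRange 0 m).map (fun l =>
          if k = i - o.1 ∧ l = j - o.2 ∧ pvCharAt lights k l = '#' then (1:ℤ) else 0)).sum
        = ((PySem.List.pyRange 0 m).map (fun l =>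
          if l = j - o.2 then (if k = i - o.1 ∧ pvCharAt lights k l = '#' then (1:ℤ) else 0) else 0)).sum := by
      apply pvSumCongr; intro l _; split_ifs <;> tauto
    rw [h1, pvSumDelta _ (PySem.List.nodup_pyRange_one 0 m)]
    simp only [PySem.List.mem_pyRange_one]
    split_ifs <;> tauto
  rw [pvSumCongr _ (fun k _ => inner k)]
  have h2 := pvSumDelta (PySem.List.pyRange 0 (PySem.List.len lights))
    (PySem.List.nodup_pyRange_one _ _) (i - o.1)
    (fun k => if 0 ≤ j - o.2 ∧ j - o.2 < m ∧ pvCharAt lights k (j - o.2) = '#' then (1:ℤ) else 0)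
  rw [h2]
  simp only [PySem.List.mem_pyRange_one]
  unfold pvT
  simp only [PySem.List.len_eq]
  split_ifs <;> tauto

lemma pvGather (lights : List String) (m i j : Int)
    (hrow : ((PySem.List.pyGetD lights i "").toList.length : Int) = m) :
    pvNeighborsLightsA lights i j
      = (pvOffsetsB.map (fun o => pvT lights m (i + o.1) (j + o.2))).sum := by
  unfold pvNeighborsLightsA pvNeighborsA
  rw [hrow]
  have hpos : [((i-1,j-1) : Int × Int),(i,j-1),(i+1,j-1),(i-1,j),(i+1,j),(i-1,j+1),(i,j+1),(i+1,j+1)]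
      = pvOffsetsB.map (fun o => (i + o.1, j + o.2)) := by
    simp [pvOffsetsB, sub_eq_add_neg]
  have hfif := PySem.List.foldl_append_if
    (fun p : Int × Int => decide (0 ≤ p.1 ∧ p.1 < (lights.length : Int) ∧ 0 ≤ p.2 ∧ p.2 < m)) id
    (pvOffsetsB.map (fun o => ((i + o.1, j + o.2) : Int × Int))) []
  simp only [id_eq, List.map_id, List.nil_append] at hfif
  rw [hpos, hfif, PySem.List.foldl_count_if,
    List.countP_filter, List.countP_map, ← PySem.List.sum_map_ite_one_zero, zero_add]
  apply pvSumCongr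
  intro o _
  simp only [Function.comp, Bool.and_eq_true, decide_eq_true_eq]
  unfold pvT pvCharAt
  split_ifs <;> tauto

lemma pvSumNeg (f : Int × Int → ℤ) :
    (pvOffsetsB.map (fun o => f (-o.1, -o.2))).sum = (pvOffsetsB.map f).sum := by
  have hperm : (pvOffsetsB.map (fun o : Int × Int => ((-o.1, -o.2) : Int × Int))).Perm pvOffsetsB := by
    decide
  calc (pvOffsetsB.map (fun o => f (-o.1, -o.2))).sum
      = ((pvOffsetsB.map (fun o : Int × Int => ((-o.1, -o.2) : Int × Int))).map f).sum := by
        rw [List.map_map]; rfl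
    _ = (pvOffsetsB.map f).sum := (hperm.map f).sum_eq

lemma pvCounts (lights : List String) (m i j : Int)
    (hrow : ((PySem.List.pyGetD lights i "").toList.length : Int) = m) :
    (pvScatterB lights m).getD (i, j) 0 = pvNeighborsLightsA lights i j := by
  rw [pvScatter_eq_counter, PySem.Dict.getD_counter, pvBumpsCount, pvGather lights m i j hrow,
    ← pvSumNeg (fun o => pvT lights m (i + o.1) (j + o.2))]
  apply pvSumCongr
  intro o _
  simp [sub_eq_add_neg]

lemma pvCellChar (lights : List String) (i j : Int) (c : Int)
    (hc : c = pvNeighborsLightsA lights i j) :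
    (if c = 3 ∨ (pvCharAt lights i j = '#' ∧ c = 2) then '#' else '.') = pvNextStepSingleA lights i j := by
  subst hc
  unfold pvNextStepSingleA
  split_ifs <;> tauto

theorem pv_main (lights : List String) (hpre : Pre_nextStepFixedCorners lights) :
    nextStepFixedCorners lights = nextStepFixedCorners_alt lights := by
  by_cases hne : lights = []
  · subst hne
    simp [nextStepFixedCorners, nextStepFixedCorners_alt, PySem.List.pyRange_one_eq_nil]
  unfold nextStepFixedCorners nextStepFixedCorners_alt
  rw [if_neg hne]
  simp only [PySem.List.foldl_append_singleton_eq_map, List.nil_append]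
  apply List.map_congr_left
  intro i hi
  rw [PySem.List.mem_pyRange_one] at hi
  unfold pvOutRowA pvOutRowB
  simp only [PySem.List.foldl_append_singleton_eq_map, List.nil_append]
  rcases hpre with hm0 | hrect
  · rw [hm0]
    norm_num [PySem.List.pyRange_one_eq_nil]
  · have hrow : ((PySem.List.pyGetD lights i "").toList.length : Int)
        = ((PySem.List.pyGetD lights 0 "").toList.length : Int) := by
      have hmem : PySem.List.pyGetD lights i "" ∈ lights := by
        apply PySem.List.pyGetD_mem
        constructor <;> omega
      exact_mod_cast hrect _ hmem
    have hrows : (PySem.List.pyRange 0 ((PySem.List.pyGetD lights 0 "").toList.length : Int)).map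
          (fun j => pvNextStepSingleA lights i j)
        = (PySem.List.pyRange 0 ((PySem.List.pyGetD lights 0 "").toList.length : Int)).map
          (fun j =>
            if (pvScatterB lights ((PySem.List.pyGetD lights 0 "").toList.length : Int)).getD (i, j) 0 = 3 ∨
                (pvCharAt lights i j = '#' ∧
                  (pvScatterB lights ((PySem.List.pyGetD lights 0 "").toList.length : Int)).getD (i, j) 0 = 2)
            then '#' else '.') := by
      apply List.map_congr_left
      intro j _
      exact (pvCellChar lights i j _ (pvCounts lights _ i j hrow)).symm
    rw [hrows]

-- ===== VERDICT (by name: the statement is the Claim_ definition above) =====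
theorem nextStepFixedCorners_spec : Claim_equal_nextStepFixedCorners := by
  intro lights _ hpre
  exact pv_main lights hpre
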